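-- pv_equiv track=rewrite | github.com/mikhaaiil/CodeRunBoostChallenge | bridge_7264.py | solution
-- ===== SOURCE A (Python) =====
-- def solution(n, a):
--     pos = sorted(a)
--     max_segment = 0
--     left = 0
--     for right in range(n):
--         while pos[right] - pos[left] > n - 1:
--             left += 1
--         max_segment = max(max_segment, right - left + 1)
--     return n - max_segment
-- ===== SOURCE B (Python) =====
-- def solution(n, a):
--     pos = sorted(a)[:n]
--     best = 0
--     for v in pos:
--         inside = sum(1 for y in pos if v <= y <= v + n - 1)
--         best = max(best, inside)
--     return n - best
-- ===== Notes on version B (the rewrite author's own statement) =====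
-- stated objective: alternative
-- what changed: Replaces A's sorted two-pointer sliding-window scan by a windowless quadratic counting pass: for each kept value v it counts the values lying in [v, v+n-1] and takes n minus the maximal count; no pointers or index arithmetic remain.
import Mathlib
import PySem

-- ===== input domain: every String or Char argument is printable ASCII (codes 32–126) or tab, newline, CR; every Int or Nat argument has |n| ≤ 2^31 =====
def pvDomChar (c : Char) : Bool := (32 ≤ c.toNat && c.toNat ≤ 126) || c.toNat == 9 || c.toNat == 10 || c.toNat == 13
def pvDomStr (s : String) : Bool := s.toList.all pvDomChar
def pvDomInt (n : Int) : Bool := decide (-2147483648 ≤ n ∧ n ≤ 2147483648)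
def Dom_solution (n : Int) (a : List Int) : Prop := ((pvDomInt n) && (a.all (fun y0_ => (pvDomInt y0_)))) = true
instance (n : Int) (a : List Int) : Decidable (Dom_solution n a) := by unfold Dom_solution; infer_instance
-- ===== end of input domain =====

-- B replaces A's two-pointer sliding window over the sorted list by a quadratic counting
-- pass: for each kept value v, count values in [v, v+n-1] (objective: alternative).

-- ===== PORT A =====
-- the inner 'while pos[right] - pos[left] > n - 1: left += 1' loop; fuel bounds the steps
-- (fuel right+1 is always enough on Pre_, since the condition fails at left = right)
def pvAdvance (pos : List Int) (bnd : Int) (r : Int) : Nat → Nat → Nat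
  | 0, left => left
  | fuel + 1, left =>
    if PySem.List.pyGetD pos r 0 - PySem.List.pyGetD pos (left : Int) 0 > bnd then
      pvAdvance pos bnd r fuel (left + 1)
    else left

def solution (n : Int) (a : List Int) : Int :=
  let pos := PySem.List.sorted a (fun x => x) false
  let res := (PySem.List.pyRange 0 n 1).foldl
    (fun (st : Int × Nat) r =>
      let left := pvAdvance pos (n - 1) r (r.toNat + 1) st.2
      (max st.1 (r - (left : Int) + 1), left))
    (0, 0)
  n - res.1

-- ===== PORT B =====
-- Source B: pos = sorted(a)[:n]; for v in pos: inside = sum(1 for y in pos if v <= y <= v+n-1)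
-- (the 0/1-sum is List.countP); best = max(best, inside); return n - best
def solution_alt (n : Int) (a : List Int) : Int :=
  let pos := PySem.List.slice (PySem.List.sorted a (fun x => x) false) none (some n)
  let best := pos.foldl
    (fun (best : Int) v =>
      let inside : Int := (pos.countP (fun y => decide (v ≤ y ∧ y ≤ v + n - 1)) : Nat)
      max best inside)
    0
  n - best

-- ===== PRECONDITION & SPEC =====
-- Pre_ excludes exactly the inputs where A raises IndexError: n larger than len(a)
-- (then pos[right] is read out of range for some right in range(n)).
def Pre_solution (n : Int) (a : List Int) : Prop := n ≤ (a.length : Int)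
instance (n : Int) (a : List Int) : Decidable (Pre_solution n a) := by unfold Pre_solution; infer_instance
def pvWitness_solution : Int × List Int := (3, [5, 1, 9])

def Spec_solution (n : Int) (a : List Int) (out : Int) : Prop := out = solution_alt n a
instance (n : Int) (a : List Int) (out : Int) : Decidable (Spec_solution n a out) := by unfold Spec_solution; infer_instance

-- ===== CLAIM (what is proved, stated in full; the proofs are below) =====
def Claim_equal_solution : Prop := ∀ (n : Int) (a : List Int), Dom_solution n a → Pre_solution n a → Spec_solution n a (solution n a)

-- ===== LEMMAS AND PROOFS =====

-- g: indexing into the sorted list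
theorem pv_g_mono (p : List Int) (hp : p.Pairwise (· ≤ ·)) (i j : Nat) (hij : i ≤ j)
    (hj : j < p.length) : p.getD i 0 ≤ p.getD j 0 := by
  rcases Nat.lt_or_ge i j with h | h
  · have := List.pairwise_iff_getElem.mp hp i j (lt_of_lt_of_le h (le_of_lt hj)) hj h
    simpa [List.getD, List.getElem?_eq_getElem, lt_of_lt_of_le h (le_of_lt hj), hj] using this
  · have : i = j := le_antisymm hij h
    subst this; rfl

-- spec of the while-loop port: returns the least l ≥ left in [left, r] with g r - g l ≤ bnd
theorem pvAdvance_spec (pos : List Int) (bnd : Int) (r : Nat) :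
    ∀ fuel left, left ≤ r → r + 1 ≤ fuel + left →
    pos.getD r 0 - pos.getD r 0 ≤ bnd →
    (left ≤ pvAdvance pos bnd (r : Int) fuel left ∧
     pvAdvance pos bnd (r : Int) fuel left ≤ r ∧
     pos.getD r 0 - pos.getD (pvAdvance pos bnd (r : Int) fuel left) 0 ≤ bnd ∧
     ∀ l, left ≤ l → l < pvAdvance pos bnd (r : Int) fuel left →
       bnd < pos.getD r 0 - pos.getD l 0) := by
  intro fuel
  induction fuel with
  | zero => intro left h1 h2 h3; omega
  | succ fuel ih =>
    intro left h1 h2 h3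
    simp only [pvAdvance, PySem.List.pyGetD_natCast]
    split_ifs with hc
    · have hlr : left < r := by
        rcases Nat.lt_or_ge left r with h | h
        · exact h
        · have : left = r := le_antisymm h1 h
          subst this; omega
      have := ih (left + 1) (by omega) (by omega) h3
      refine ⟨by omega, this.2.1, this.2.2.1, ?_⟩
      intro l hl1 hl2
      rcases Nat.lt_or_ge l (left + 1) with h | h
      · have : l = left := by omega
        subst this; omega
      · exact this.2.2.2 l h hl2
    · exact ⟨le_refl _, h1, by omega, by omega⟩

-- generic max-fold lemmas
theorem pv_foldl_max_le {α : Type} (l : List α) (f : α → Int) :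
    ∀ (c m : Int), c ≤ m → (∀ x ∈ l, f x ≤ m) →
    l.foldl (fun b x => max b (f x)) c ≤ m := by
  induction l with
  | nil => intro c m hc _; simpa using hc
  | cons x t ih =>
    intro c m hc h
    simp only [List.foldl_cons]
    exact ih _ m (max_le hc (h x (by simp))) (fun y hy => h y (by simp [hy]))

theorem pv_init_le_foldl_max {α : Type} (l : List α) (f : α → Int) :
    ∀ (c : Int), c ≤ l.foldl (fun b x => max b (f x)) c := by
  induction l with
  | nil => intro c; simp
  | cons x t ih =>
    intro c
    simp only [List.foldl_cons]
    exact le_trans (le_max_left _ _) (ih _)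

theorem pv_mem_le_foldl_max {α : Type} (l : List α) (f : α → Int) :
    ∀ (c : Int) (x : α), x ∈ l → f x ≤ l.foldl (fun b x => max b (f x)) c := by
  induction l with
  | nil => intro c x hx; simp at hx
  | cons y t ih =>
    intro c x hx
    simp only [List.foldl_cons]
    rcases List.mem_cons.mp hx with h | h
    · subst h; exact le_trans (le_max_right _ _) (pv_init_le_foldl_max t f _)
    · exact ih _ x h

-- counting an index interval from below: if all of [lo,hi] satisfy pred, countP ≥ hi-lo+1
theorem pv_countP_ge (q : List Int) (pred : Int → Bool) (lo hi : Nat)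
    (hhi : hi < q.length) (hlo : lo ≤ hi)
    (hin : ∀ i, lo ≤ i → i ≤ hi → pred (q.getD i 0) = true) :
    hi - lo + 1 ≤ q.countP pred := by
  have hmid : ((q.drop lo).take (hi - lo + 1)).countP pred = hi - lo + 1 := by
    rw [List.countP_eq_length.mpr, List.length_take, List.length_drop]
    · omega
    · intro x hx
      obtain ⟨t, ht, hxe⟩ := List.mem_iff_getElem.mp hx
      have ht2 : t < hi - lo + 1 := lt_of_lt_of_le ht (by simp [List.length_take])
      have ht3 : lo + t < q.length := by
        have := ht; simp [List.length_take, List.length_drop] at this; omega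
      have : x = q.getD (lo + t) 0 := by
        rw [← hxe, List.getElem_take, List.getElem_drop, List.getD_eq_getElem q 0 ht3]
      rw [this]
      exact hin (lo + t) (by omega) (by omega)
  calc hi - lo + 1 = ((q.drop lo).take (hi - lo + 1)).countP pred := hmid.symm
    _ ≤ (q.drop lo).countP pred := (List.take_sublist _ _).countP_le
    _ ≤ q.countP pred := (List.drop_sublist _ _).countP_le

-- counting an index interval from above: if only indices in [lo,hi] can satisfy pred
theorem pv_countP_le (q : List Int) (pred : Int → Bool) (lo hi : Nat) (hlo : lo ≤ hi)
    (hout : ∀ i, (h : i < q.length) → pred (q.getD i 0) = true → lo ≤ i ∧ i ≤ hi) :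
    q.countP pred ≤ hi - lo + 1 := by
  have hsplit1 : q = q.take (hi + 1) ++ q.drop (hi + 1) := (List.take_append_drop _ q).symm
  have hsplit2 : q.take (hi + 1) = q.take lo ++ (q.drop lo).take (hi + 1 - lo) := by
    conv_lhs => rw [show hi + 1 = lo + (hi + 1 - lo) by omega]
    exact List.take_add
  have hlo0 : (q.take lo).countP pred = 0 := by
    rw [List.countP_eq_zero]
    intro x hx
    obtain ⟨t, ht, hxe⟩ := List.mem_iff_getElem.mp hx
    have ht1 : t < lo := lt_of_lt_of_le ht (by simp [List.length_take])
    have ht2 : t < q.length := by have := ht; simp [List.length_take] at this; omega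
    have hxq : x = q.getD t 0 := by
      rw [← hxe, List.getElem_take, List.getD_eq_getElem q 0 ht2]
    intro hcon
    have := hout t ht2 (by rw [← hxq]; exact hcon)
    omega
  have hhi0 : (q.drop (hi + 1)).countP pred = 0 := by
    rw [List.countP_eq_zero]
    intro x hx
    obtain ⟨t, ht, hxe⟩ := List.mem_iff_getElem.mp hx
    have ht2 : hi + 1 + t < q.length := by
      have := ht; simp [List.length_drop] at this; omega
    have hxq : x = q.getD (hi + 1 + t) 0 := by
      rw [← hxe, List.getElem_drop, List.getD_eq_getElem q 0 ht2]
    intro hcon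
    have := hout (hi + 1 + t) ht2 (by rw [← hxq]; exact hcon)
    omega
  calc q.countP pred
      = (q.take (hi+1)).countP pred + (q.drop (hi+1)).countP pred := by
        conv_lhs => rw [hsplit1]
        exact List.countP_append
    _ = (q.take lo).countP pred + ((q.drop lo).take (hi+1-lo)).countP pred
          + (q.drop (hi+1)).countP pred := by rw [hsplit2, List.countP_append]
    _ = ((q.drop lo).take (hi+1-lo)).countP pred := by rw [hlo0, hhi0]; omega
    _ ≤ hi + 1 - lo := le_trans (List.countP_le_length) (by simp)
    _ ≤ hi - lo + 1 := by omega

-- invariant carried by A's fold state, as a predicate on (left, k) after processing rights 0..k-1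
def pvInv (p : List Int) (n : Int) (left k : Nat) : Prop :=
  (k = 0 ∧ left = 0) ∨
  (1 ≤ k ∧ left ≤ k - 1 ∧ p.getD (k-1) 0 - p.getD left 0 ≤ n - 1 ∧
    ∀ l, l < left → n - 1 < p.getD (k-1) 0 - p.getD l 0)

-- main induction: A's stateful fold keeps its invariant, stays ≤ B's best, and records,
-- for every processed right j, the minimal window start l with its segment length ≤ state
theorem pv_main (p : List Int) (hp : p.Pairwise (· ≤ ·)) (n : Int) (hn1 : 1 ≤ n)
    (hlen : n ≤ (p.length : Int)) :
    ∀ k : Nat, (k : Int) ≤ n →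
    (pvInv p n ((PySem.List.pyRange 0 (k : Int) 1).foldl
        (fun (st : Int × Nat) r =>
          let left := pvAdvance p (n - 1) r (r.toNat + 1) st.2
          (max st.1 (r - (left : Int) + 1), left)) (0, 0)).2 k ∧
     0 ≤ ((PySem.List.pyRange 0 (k : Int) 1).foldl
        (fun (st : Int × Nat) r =>
          let left := pvAdvance p (n - 1) r (r.toNat + 1) st.2
          (max st.1 (r - (left : Int) + 1), left)) (0, 0)).1 ∧
     ((PySem.List.pyRange 0 (k : Int) 1).foldl
        (fun (st : Int × Nat) r =>
          let left := pvAdvance p (n - 1) r (r.toNat + 1) st.2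
          (max st.1 (r - (left : Int) + 1), left)) (0, 0)).1 ≤
       (p.take n.toNat).foldl
        (fun (best : Int) v =>
          max best (((p.take n.toNat).countP (fun y => decide (v ≤ y ∧ y ≤ v + n - 1)) : Nat) : Int)) 0 ∧
     ∀ j : Nat, j < k → ∃ l : Nat, l ≤ j ∧ p.getD j 0 - p.getD l 0 ≤ n - 1 ∧
       (∀ l', l' < l → n - 1 < p.getD j 0 - p.getD l' 0) ∧
       ((j : Int) - l + 1 ≤ ((PySem.List.pyRange 0 (k : Int) 1).foldl
        (fun (st : Int × Nat) r =>
          let left := pvAdvance p (n - 1) r (r.toNat + 1) st.2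
          (max st.1 (r - (left : Int) + 1), left)) (0, 0)).1)) := by
  have hm : n.toNat ≤ p.length := by omega
  have hq : ∀ i, i < n.toNat → (p.take n.toNat).getD i 0 = p.getD i 0 := by
    intro i hi
    rw [List.getD_eq_getElem _ 0 (by simp [List.length_take]; omega),
        List.getD_eq_getElem _ 0 (by omega), List.getElem_take]
  intro k
  induction k with
  | zero =>
    intro _
    refine ⟨by simp [PySem.List.pyRange_one_eq_nil, pvInv], ?_, ?_, ?_⟩
    · simp [PySem.List.pyRange_one_eq_nil]
    · simpa [PySem.List.pyRange_one_eq_nil] using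
        pv_init_le_foldl_max (p.take n.toNat)
          (fun v => (((p.take n.toNat).countP (fun y => decide (v ≤ y ∧ y ≤ v + n - 1)) : Nat) : Int)) 0
    · intro j hj; omega
  | succ k ih =>
    intro hk1
    have hkn : (k : Int) ≤ n := by push_cast at hk1 ⊢; omega
    have hkp : k < p.length := by push_cast at hk1; omega
    have hkm : k < n.toNat := by push_cast at hk1; omega
    obtain ⟨ihInv, ihNonneg, ihLe, ihWit⟩ := ih hkn
    have hsplit : PySem.List.pyRange 0 ((k : Nat) + 1 : Int) 1
        = PySem.List.pyRange 0 (k : Int) 1 ++ [(k : Int)] :=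
      PySem.List.pyRange_one_succ_right (by positivity)
    push_cast
    rw [hsplit, List.foldl_append]
    set stA := (PySem.List.pyRange 0 (k : Int) 1).foldl
        (fun (st : Int × Nat) r =>
          let left := pvAdvance p (n - 1) r (r.toNat + 1) st.2
          (max st.1 (r - (left : Int) + 1), left)) (0, 0) with hstA
    have hprev : stA.2 ≤ k := by
      rcases ihInv with ⟨_, h⟩ | ⟨_, h, _⟩ <;> omega
    have hadv := pvAdvance_spec p (n - 1) k (k + 1) stA.2 hprev (by omega) (by omega)
    set left' := pvAdvance p (n - 1) (k : Int) (k + 1) stA.2 with hleft'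
    have hbelow : ∀ l, l < left' → n - 1 < p.getD k 0 - p.getD l 0 := by
      intro l hl
      rcases Nat.lt_or_ge l stA.2 with h | h
      · rcases ihInv with ⟨hk0, h0⟩ | ⟨hk1', _, _, hall⟩
        · omega
        · have h1 := hall l h
          have h2 : p.getD (k - 1) 0 ≤ p.getD k 0 := pv_g_mono p hp (k - 1) k (by omega) hkp
          omega
      · exact hadv.2.2.2 l h hl
    have winK : (k : Int) - left' + 1 ≤
        (p.take n.toNat).foldl
          (fun (best : Int) v =>
            max best (((p.take n.toNat).countP (fun y => decide (v ≤ y ∧ y ≤ v + n - 1)) : Nat) : Int)) 0 := by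
      have hlk : left' ≤ k := hadv.2.1
      have hcnt : k - left' + 1 ≤
          (p.take n.toNat).countP
            (fun y => decide (p.getD left' 0 ≤ y ∧ y ≤ p.getD left' 0 + n - 1)) := by
        refine pv_countP_ge _ _ left' k (by simp [List.length_take]; omega) hlk ?_
        intro i h1 h2
        rw [hq i (by omega), decide_eq_true_iff]
        have e1 : p.getD left' 0 ≤ p.getD i 0 := pv_g_mono p hp left' i h1 (by omega)
        have e2 : p.getD i 0 ≤ p.getD k 0 := pv_g_mono p hp i k h2 hkp
        have e3 := hadv.2.2.1
        constructor <;> omega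
      have hvmem : p.getD left' 0 ∈ p.take n.toNat := by
        have hlq : left' < (p.take n.toNat).length := by simp [List.length_take]; omega
        have : (p.take n.toNat).getD left' 0 ∈ p.take n.toNat := by
          rw [List.getD_eq_getElem _ 0 hlq]; exact List.getElem_mem _
        rwa [hq left' (by omega)] at this
      have := pv_mem_le_foldl_max (p.take n.toNat)
        (fun v => (((p.take n.toNat).countP (fun y => decide (v ≤ y ∧ y ≤ v + n - 1)) : Nat) : Int))
        0 (p.getD left' 0) hvmem
      have hki : ((k - left' + 1 : Nat) : Int) = (k : Int) - (left' : Int) + 1 := by omega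
      rw [← hki]
      exact le_trans (Nat.cast_le.mpr hcnt) this
    refine ⟨?_, ?_, ?_, ?_⟩
    · simp only [List.foldl_cons, List.foldl_nil, Int.toNat_natCast, ← hleft']
      right
      refine ⟨by omega, by simpa using hadv.2.1, by simpa using hadv.2.2.1, ?_⟩
      intro l hl
      simp only [Nat.add_sub_cancel]
      exact hbelow l (by simpa using hl)
    · simp only [List.foldl_cons, List.foldl_nil, Int.toNat_natCast, ← hleft']
      exact le_trans ihNonneg (le_max_left _ _)
    · simp only [List.foldl_cons, List.foldl_nil, Int.toNat_natCast, ← hleft']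
      exact max_le ihLe winK
    · intro j hj
      simp only [List.foldl_cons, List.foldl_nil, Int.toNat_natCast, ← hleft']
      rcases Nat.lt_or_ge j k with h | h
      · obtain ⟨l, hl1, hl2, hl3, hl4⟩ := ihWit j h
        exact ⟨l, hl1, hl2, hl3, le_trans hl4 (le_max_left _ _)⟩
      · have hje : j = k := by omega
        subst hje
        exact ⟨left', hadv.2.1, hadv.2.2.1, hbelow, le_max_right _ _⟩

-- ===== VERDICT (by name: the statement is the Claim_ definition above) =====
theorem solution_spec : Claim_equal_solution := by
  intro n a _ hpre
  unfold Spec_solution solution solution_alt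
  dsimp only
  set p := PySem.List.sorted a (fun x => x) false with hpdef
  have hp : p.Pairwise (· ≤ ·) := by
    simpa using PySem.List.sorted_pairwise a (fun x => x)
  have hlen : p.length = a.length := PySem.List.length_sorted a (fun x => x) false
  have hn : n ≤ (p.length : Int) := by rw [hlen]; exact hpre
  rcases (by omega : n ≤ 0 ∨ 0 < n) with h0 | h0
  · -- n ≤ 0: A's range is empty; every count in B is 0 since [v, v+n-1] is empty
    rw [PySem.List.pyRange_one_eq_nil h0]
    simp only [List.foldl_nil]
    have hzero : (PySem.List.slice p none (some n)).foldl
        (fun (best : Int) v =>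
          max best (((PySem.List.slice p none (some n)).countP
            (fun y => decide (v ≤ y ∧ y ≤ v + n - 1)) : Nat) : Int)) 0 = 0 := by
      refine le_antisymm ?_ (pv_init_le_foldl_max _ _ 0)
      refine pv_foldl_max_le _ _ 0 0 le_rfl ?_
      intro v _
      have : (PySem.List.slice p none (some n)).countP
          (fun y => decide (v ≤ y ∧ y ≤ v + n - 1)) = 0 := by
        rw [List.countP_eq_zero]
        intro y _
        rw [decide_eq_true_iff]
        omega
      simp only [this, Nat.cast_zero, le_refl]
    rw [hzero]
  · -- 0 < n: the slice is take n.toNat and pv_main pins both folds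
    rw [PySem.List.slice_to p (le_of_lt h0)]
    have hk : ((n.toNat : Nat) : Int) = n := Int.toNat_of_nonneg h0.le
    have hmain := pv_main p hp n (by omega) hn n.toNat (by omega)
    rw [hk] at hmain
    obtain ⟨_, hNonneg, hLe, hWit⟩ := hmain
    have hqlen : (p.take n.toNat).length = n.toNat := by simp [List.length_take]; omega
    have hq : ∀ i, i < n.toNat → (p.take n.toNat).getD i 0 = p.getD i 0 := by
      intro i hi
      rw [List.getD_eq_getElem _ 0 (by omega), List.getD_eq_getElem _ 0 (by omega),
          List.getElem_take]
    have hGe : (p.take n.toNat).foldl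
        (fun (best : Int) v =>
          max best (((p.take n.toNat).countP (fun y => decide (v ≤ y ∧ y ≤ v + n - 1)) : Nat) : Int)) 0 ≤
        ((PySem.List.pyRange 0 n 1).foldl
          (fun (st : Int × Nat) r =>
            let left := pvAdvance p (n - 1) r (r.toNat + 1) st.2
            (max st.1 (r - (left : Int) + 1), left)) (0, 0)).1 := by
      refine pv_foldl_max_le _ _ 0 _ hNonneg ?_
      intro v hv
      obtain ⟨i0, hi0, hvi⟩ := List.mem_iff_getElem.mp hv
      have hi0m : i0 < n.toNat := by omega
      have hvq : (p.take n.toNat).getD i0 0 = v := by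
        rw [List.getD_eq_getElem _ 0 hi0]; exact hvi
      have hPi0 : (p.take n.toNat).getD i0 0 ≤ v + n - 1 := by rw [hvq]; omega
      set j := Nat.findGreatest (fun t => (p.take n.toNat).getD t 0 ≤ v + n - 1) (n.toNat - 1) with hjdef
      have hij : i0 ≤ j := Nat.le_findGreatest (by omega) hPi0
      have hPj : (p.take n.toNat).getD j 0 ≤ v + n - 1 := by
        have := Nat.findGreatest_spec
          (P := fun t => (p.take n.toNat).getD t 0 ≤ v + n - 1)
          (show i0 ≤ n.toNat - 1 by omega) hPi0
        rwa [← hjdef] at this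
      have hjm : j ≤ n.toNat - 1 := Nat.findGreatest_le _
      obtain ⟨l, hl1, hl2, hl3, hl4⟩ := hWit j (by omega)
      have hcnt : (p.take n.toNat).countP (fun y => decide (v ≤ y ∧ y ≤ v + n - 1)) ≤ j - l + 1 := by
        refine pv_countP_le _ _ l j (by omega) ?_
        intro i hiq hpredi
        rw [hq i (by omega), decide_eq_true_iff] at hpredi
        obtain ⟨h1, h2⟩ := hpredi
        have hijle : i ≤ j := by
          by_contra hcon
          have hji2 : Nat.findGreatest (fun t => (p.take n.toNat).getD t 0 ≤ v + n - 1)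
              (n.toNat - 1) < i := by rw [← hjdef]; omega
          have := Nat.findGreatest_is_greatest hji2 (show i ≤ n.toNat - 1 by omega)
          exact this (by rw [hq i (by omega)]; omega)
        have hli : l ≤ i := by
          by_contra hcon
          have h3 := hl3 i (lt_of_not_ge hcon)
          have h4 : p.getD j 0 ≤ v + n - 1 := by rw [← hq j (by omega)]; exact hPj
          omega
        exact ⟨hli, hijle⟩
      have hji : ((j - l + 1 : Nat) : Int) = (j : Int) - (l : Int) + 1 := by omega
      calc (((p.take n.toNat).countP (fun y => decide (v ≤ y ∧ y ≤ v + n - 1)) : Nat) : Int)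
          ≤ ((j - l + 1 : Nat) : Int) := Nat.cast_le.mpr hcnt
        _ = (j : Int) - (l : Int) + 1 := hji
        _ ≤ _ := hl4
    have : ((PySem.List.pyRange 0 n 1).foldl
          (fun (st : Int × Nat) r =>
            let left := pvAdvance p (n - 1) r (r.toNat + 1) st.2
            (max st.1 (r - (left : Int) + 1), left)) (0, 0)).1 =
        (p.take n.toNat).foldl
          (fun (best : Int) v =>
            max best (((p.take n.toNat).countP (fun y => decide (v ≤ y ∧ y ≤ v + n - 1)) : Nat) : Int)) 0 :=
      le_antisymm hLe hGe
    rw [this]
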